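-- pv_equiv track=rewrite | github.com/mixmikmic/GH_code_analysis | python/check_junction_count_annotations_part2.py | get_offset_m_basedon_n
-- ===== SOURCE A (Python) =====
-- def get_offset_m_basedon_n(cigartuples, n, include_jxn_span=True):
--     """
--     for junction # n (0 based), return the left and right offsets m
--     """
--     all_counter = 0
--     counter = 0
--     left_accumulated_m = 0
--     current_left_offset = 0
--     current_right_offset = 0
--
--     for t in cigartuples:
--         if t[0] == 0:
--             left_accumulated_m += t[1]
--         elif t[0] == 3:
--             if include_jxn_span:
--                 current_left_offset = left_accumulated_m + t[1]
--             else: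
--                 current_left_offset = left_accumulated_m
--             counter += 1
--
--
--         if counter >= n:
--             for tr in cigartuples[all_counter:]:
--                 if tr[0] == 0:
--                     current_right_offset += tr[1]
--                 elif tr[0] == 3 and include_jxn_span == True:
--                     current_right_offset += tr[1]
--
--             return [current_left_offset, current_right_offset]
--         all_counter += 1
--     return [current_left_offset, current_right_offset]
-- ===== SOURCE B (Python) =====
-- def get_offset_m_basedon_n(cigartuples, n, include_jxn_span=True):
--     """
--     for junction # n (0 based), return the left and right offsets m.
--     Staged: locate the pivot index, locate the last junction within the
--     pivot's prefix, then compute each offset as a sum over a slice.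
--     """
--     # stage 1: pivot = first index i where the junction count over cigartuples[:i+1] reaches n
--     p = None
--     c = 0
--     for i, t in enumerate(cigartuples):
--         if t[0] == 3:
--             c += 1
--         if c >= n:
--             p = i
--             break
--     # stage 2: last junction (index, span) inside the scope the left offset sees
--     scope = cigartuples if p is None else cigartuples[:p + 1]
--     j = None
--     for i, t in enumerate(scope):
--         if t[0] == 3:
--             j = (i, t[1])
--     # stage 3: closed-form sums over slices
--     if j is None:
--         left = 0
--     else:
--         left = sum(t[1] for t in cigartuples[:j[0]] if t[0] == 0)
--         if include_jxn_span:
--             left += j[1]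
--     if p is None:
--         right = 0
--     else:
--         right = sum(t[1] for t in cigartuples[p:]
--                     if t[0] == 0 or (t[0] == 3 and include_jxn_span))
--     return [left, right]
-- ===== Notes on version B (the rewrite author's own statement) =====
-- stated objective: alternative
-- what changed: Replaces A's single accumulating pass with early return plus an inner suffix re-scan by a staged computation: first locate the pivot index where the junction count reaches n, then locate the last junction (index, span) in the pivot's prefix, then compute each offset as a sum over the corresponding slice.
import Mathlib
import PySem

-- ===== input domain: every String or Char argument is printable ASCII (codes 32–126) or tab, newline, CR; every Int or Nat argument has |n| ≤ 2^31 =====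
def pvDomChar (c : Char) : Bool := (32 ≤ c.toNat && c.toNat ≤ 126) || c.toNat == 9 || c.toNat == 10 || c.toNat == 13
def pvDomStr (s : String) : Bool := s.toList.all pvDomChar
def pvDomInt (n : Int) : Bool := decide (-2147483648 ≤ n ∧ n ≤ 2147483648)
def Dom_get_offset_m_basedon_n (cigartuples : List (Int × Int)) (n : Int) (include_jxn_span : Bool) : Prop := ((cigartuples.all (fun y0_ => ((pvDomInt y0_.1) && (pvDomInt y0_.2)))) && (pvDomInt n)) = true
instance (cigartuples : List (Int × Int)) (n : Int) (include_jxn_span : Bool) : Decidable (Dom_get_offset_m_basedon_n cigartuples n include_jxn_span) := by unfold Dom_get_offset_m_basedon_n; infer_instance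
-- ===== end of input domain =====

-- B replaces A's accumulate-as-you-go pass with early return and suffix re-scan by a staged
-- computation: find the pivot index, find the last junction in its prefix, then two slice sums
-- (alternative decomposition; same cost; return value only).

-- ===== PORT A =====

-- inner loop: 'for tr in cigartuples[all_counter:]: …' accumulating current_right_offset
def aRight (inc : Bool) (suffix : List (Int × Int)) (acc : Int) : Int :=
  suffix.foldl (fun r tr =>
    if tr.1 = 0 then r + tr.2
    else if tr.1 = 3 ∧ inc = true then r + tr.2
    else r) acc

-- outer loop with early return; all_counter tracks the index used by the slice
def aLoop (cigartuples : List (Int × Int)) (n : Int) (inc : Bool) :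
    List (Int × Int) → Int → Int → Int → Int → List Int
  | [], _, _, _, cur_left => [cur_left, 0]
  | t :: ts, all_counter, counter, left_acc, cur_left =>
    let s :=
      if t.1 = 0 then (left_acc + t.2, cur_left, counter)
      else if t.1 = 3 then (left_acc, (if inc then left_acc + t.2 else left_acc), counter + 1)
      else (left_acc, cur_left, counter)
    if s.2.2 ≥ n then
      [s.2.1, aRight inc (PySem.List.slice cigartuples (some all_counter) none) 0]
    else
      aLoop cigartuples n inc ts (all_counter + 1) s.2.2 s.1 s.2.1

def get_offset_m_basedon_n (cigartuples : List (Int × Int)) (n : Int) (include_jxn_span : Bool) : List Int :=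
  aLoop cigartuples n include_jxn_span cigartuples 0 0 0 0

-- ===== PORT B =====

-- stage 1: 'for i, t in enumerate(cigartuples): … break' — first index where the count reaches n
def findPivot (n : Int) : List (Int × Int) → Nat → Int → Option Nat
  | [], _, _ => none
  | t :: ts, i, c =>
    let c' := if t.1 = 3 then c + 1 else c
    if c' ≥ n then some i else findPivot n ts (i + 1) c'

-- stage 2: 'for i, t in enumerate(scope): if t[0] == 3: j = (i, t[1])'
def lastJxn : List (Int × Int) → Nat → Option (Nat × Int) → Option (Nat × Int)
  | [], _, j => j
  | t :: ts, i, j => lastJxn ts (i + 1) (if t.1 = 3 then some (i, t.2) else j)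

-- 'sum(t[1] for t in l if t[0] == 0)'
def bSumLeft (l : List (Int × Int)) : Int :=
  ((l.filter (fun t => t.1 == 0)).map (·.2)).sum

-- 'sum(t[1] for t in l if t[0] == 0 or (t[0] == 3 and include_jxn_span))'
def bSumRight (inc : Bool) (l : List (Int × Int)) : Int :=
  ((l.filter (fun t => t.1 == 0 || (t.1 == 3 && inc))).map (·.2)).sum

-- Python slices cigartuples[:p+1], cigartuples[:j0], cigartuples[p:] have nonnegative indices,
-- where they coincide exactly with List.take / List.drop.
def get_offset_m_basedon_n_alt (cigartuples : List (Int × Int)) (n : Int) (include_jxn_span : Bool) : List Int :=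
  let p := findPivot n cigartuples 0 0
  let scope := match p with | none => cigartuples | some pi => cigartuples.take (pi + 1)
  let j := lastJxn scope 0 none
  let left := match j with
    | none => 0
    | some (ji, sp) => bSumLeft (cigartuples.take ji) + (if include_jxn_span then sp else 0)
  let right := match p with
    | none => 0
    | some pi => bSumRight include_jxn_span (cigartuples.drop pi)
  [left, right]

-- ===== PRECONDITION & SPEC =====
def Spec_get_offset_m_basedon_n (cigartuples : List (Int × Int)) (n : Int) (include_jxn_span : Bool) (out : List Int) : Prop := out = get_offset_m_basedon_n_alt cigartuples n include_jxn_span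
instance (cigartuples : List (Int × Int)) (n : Int) (include_jxn_span : Bool) (out : List Int) : Decidable (Spec_get_offset_m_basedon_n cigartuples n include_jxn_span out) := by unfold Spec_get_offset_m_basedon_n; infer_instance

-- ===== CLAIM (what is proved, stated in full; the proofs are below) =====
def Claim_equal_get_offset_m_basedon_n : Prop := ∀ (cigartuples : List (Int × Int)) (n : Int) (include_jxn_span : Bool), Dom_get_offset_m_basedon_n cigartuples n include_jxn_span → Spec_get_offset_m_basedon_n cigartuples n include_jxn_span (get_offset_m_basedon_n cigartuples n include_jxn_span)

-- ===== LEMMAS AND PROOFS =====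

-- the value A's cur_left carries, expressed through B's stage-2/3 data on the prefix q
def leftVal (inc : Bool) (q : List (Int × Int)) : Int :=
  match lastJxn q 0 none with
  | none => 0
  | some (ji, sp) => bSumLeft (q.take ji) + (if inc then sp else 0)

lemma aRight_eq (inc : Bool) (l : List (Int × Int)) :
    ∀ acc, aRight inc l acc = acc + bSumRight inc l := by
  induction l with
  | nil => intro acc; simp [aRight, bSumRight]
  | cons t ts ih =>
    intro acc
    simp only [aRight, List.foldl] at *
    by_cases h0 : t.1 = 0
    · rw [ih]; simp [bSumRight, h0]; ring
    · by_cases h3 : t.1 = 3 ∧ inc = true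
      · simp only [if_neg h0, if_pos h3]
        rw [ih]; simp [bSumRight, h0, h3.1, h3.2]; ring
      · simp only [if_neg h0, if_neg h3]
        rw [ih]
        have : (t.1 == 0 || (t.1 == 3 && inc)) = false := by
          simp [h0]; intro h; cases inc <;> simp_all
        simp [bSumRight, this]

lemma bSumLeft_snoc (q : List (Int × Int)) (t : Int × Int) :
    bSumLeft (q ++ [t]) = bSumLeft q + (if t.1 = 0 then t.2 else 0) := by
  by_cases h : t.1 = 0 <;> simp [bSumLeft, h]

lemma lj_append (q : List (Int × Int)) :
    ∀ (r : List (Int × Int)) (i : Nat) (j : Option (Nat × Int)),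
      lastJxn (q ++ r) i j = lastJxn r (i + q.length) (lastJxn q i j) := by
  induction q with
  | nil => intro r i j; simp [lastJxn]
  | cons t ts ih =>
    intro r i j
    simp only [List.cons_append, lastJxn]
    rw [ih]
    congr 1
    simp [List.length_cons]; omega

lemma lj_bound (l : List (Int × Int)) :
    ∀ (i : Nat) (j : Option (Nat × Int)),
      (∀ ji sp, j = some (ji, sp) → ji < i) →
      ∀ ji sp, lastJxn l i j = some (ji, sp) → ji < i + l.length := by
  induction l with
  | nil =>
    intro i j hj ji sp h
    simp only [lastJxn] at h
    have := hj ji sp h; omega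
  | cons t ts ih =>
    intro i j hj ji sp h
    simp only [lastJxn] at h
    have hb : ∀ ji' sp', (if t.1 = 3 then some (i, t.2) else j) = some (ji', sp') → ji' < i + 1 := by
      intro ji' sp' h'
      by_cases h3 : t.1 = 3
      · rw [if_pos h3] at h'; cases h'; omega
      · rw [if_neg h3] at h'; have := hj ji' sp' h'; omega
    have := ih (i + 1) _ hb ji sp h
    simp [List.length_cons]; omega

lemma leftVal_snoc (inc : Bool) (q : List (Int × Int)) (t : Int × Int) :
    leftVal inc (q ++ [t]) =
      if t.1 = 3 then bSumLeft q + (if inc then t.2 else 0) else leftVal inc q := by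
  unfold leftVal
  rw [lj_append q [t] 0 none]
  by_cases h3 : t.1 = 3
  · simp only [lastJxn, if_pos h3, Nat.zero_add]
    simp [List.take_append]
  · simp only [lastJxn, if_neg h3]
    cases hlj : lastJxn q 0 none with
    | none => simp
    | some p =>
      obtain ⟨ji, sp⟩ := p
      have hb : ji < q.length := by
        have := lj_bound q 0 none (by intro _ _ h; cases h) ji sp hlj
        omega
      simp [List.take_append, Nat.sub_eq_zero_of_le (le_of_lt hb)]

-- main invariant: before the pivot fires, A's loop state over the prefix q matches
-- B's staged computation of the whole input q ++ rest
lemma main_loop (n : Int) (inc : Bool) :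
    ∀ (rest q : List (Int × Int)) (c : Int),
      findPivot n (q ++ rest) 0 0 = findPivot n rest q.length c →
      aLoop (q ++ rest) n inc rest (q.length : Int) c (bSumLeft q) (leftVal inc q) =
        get_offset_m_basedon_n_alt (q ++ rest) n inc := by
  intro rest
  induction rest with
  | nil =>
    intro q c hfp
    have hp : findPivot n (q ++ []) 0 0 = none := by rw [hfp]; rfl
    simp only [aLoop]
    unfold get_offset_m_basedon_n_alt
    rw [hp]
    simp only [List.append_nil] at *
    unfold leftVal
    cases hlj : lastJxn q 0 none with
    | none => simp
    | some p => obtain ⟨ji, sp⟩ := p; simp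
  | cons t ts ih =>
    intro q c hfp
    simp only [aLoop]
    set s :=
      if t.1 = 0 then (bSumLeft q + t.2, leftVal inc q, c)
      else if t.1 = 3 then (bSumLeft q, (if inc then bSumLeft q + t.2 else bSumLeft q), c + 1)
      else (bSumLeft q, leftVal inc q, c) with hs
    have hc' : s.2.2 = (if t.1 = 3 then c + 1 else c) := by
      by_cases h0 : t.1 = 0
      · have : ¬ t.1 = 3 := by omega
        simp [hs, h0, this]
      · by_cases h3 : t.1 = 3 <;> simp [hs, h0, h3]
    by_cases hge : s.2.2 ≥ n
    · rw [if_pos hge]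
      -- the pivot fires at index q.length
      have hp : findPivot n (q ++ t :: ts) 0 0 = some q.length := by
        rw [hfp]
        simp only [findPivot]
        rw [← hc', if_pos hge]
      unfold get_offset_m_basedon_n_alt
      rw [hp]
      simp only []
      have hscope : (q ++ t :: ts).take (q.length + 1) = q ++ [t] := by
        rw [List.take_append]
        simp
      have hdrop : (q ++ t :: ts).drop q.length = t :: ts := List.drop_left
      have hslice : PySem.List.slice (q ++ t :: ts) (some (q.length : Int)) none = t :: ts := by
        rw [PySem.List.slice_from_natCast]; exact hdrop
      rw [hslice, hdrop, hscope, aRight_eq]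
      congr 1
      · -- left component: s.2.1 = B's left from scope q ++ [t]
        rw [lj_append q [t] 0 none]
        by_cases h3 : t.1 = 3
        · have h0 : ¬ t.1 = 0 := by omega
          simp only [lastJxn, if_pos h3, Nat.zero_add]
          simp [hs, h0, h3, List.take_append]
          cases inc <;> simp
        · have heq : lastJxn [t] (0 + q.length) (lastJxn q 0 none) = lastJxn q 0 none := by
            simp [lastJxn, h3]
          rw [heq]
          have hval : s.2.1 = leftVal inc q := by
            by_cases h0 : t.1 = 0 <;> simp [hs, h0, h3]
          rw [hval]
          unfold leftVal
          cases hlj : lastJxn q 0 none with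
          | none => simp
          | some p =>
            obtain ⟨ji, sp⟩ := p
            have hb : ji < q.length := by
              have := lj_bound q 0 none (by intro _ _ h; cases h) ji sp hlj
              omega
            simp [List.take_append, Nat.sub_eq_zero_of_le (le_of_lt hb)]
      · simp
    · rw [if_neg hge]
      -- the pivot does not fire: recurse with prefix q ++ [t]
      have hfp' : findPivot n ((q ++ [t]) ++ ts) 0 0 = findPivot n ts (q ++ [t]).length s.2.2 := by
        rw [List.append_assoc]
        simp only [List.singleton_append]
        rw [hfp]
        simp only [findPivot]
        rw [← hc', if_neg hge]
        congr 1
        simp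
      have hlen : ((q ++ [t]).length : Int) = (q.length : Int) + 1 := by simp
      have hlacc : s.1 = bSumLeft (q ++ [t]) := by
        rw [bSumLeft_snoc]
        by_cases h0 : t.1 = 0
        · simp [hs, h0]
        · by_cases h3 : t.1 = 3 <;> simp [hs, h0, h3]
      have hclv : s.2.1 = leftVal inc (q ++ [t]) := by
        rw [leftVal_snoc]
        by_cases h3 : t.1 = 3
        · have h0 : ¬ t.1 = 0 := by omega
          simp [hs, h0, h3]
          cases inc <;> simp
        · by_cases h0 : t.1 = 0 <;> simp [hs, h0, h3]
      have := ih (q ++ [t]) s.2.2 hfp'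
      rw [List.append_assoc] at this
      simp only [List.singleton_append] at this
      rw [hlacc, hclv, show (q.length : Int) + 1 = ((q ++ [t]).length : Int) by rw [hlen]]
      exact this

-- ===== VERDICT (by name: the statement is the Claim_ definition above) =====
theorem get_offset_m_basedon_n_spec : Claim_equal_get_offset_m_basedon_n := by
  intro ct n inc _
  show get_offset_m_basedon_n ct n inc = get_offset_m_basedon_n_alt ct n inc
  unfold get_offset_m_basedon_n
  have := main_loop n inc ct [] 0 rfl
  simpa [bSumLeft, leftVal, lastJxn] using this
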